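-- pv_equiv track=rewrite | github.com/Applied-Linear-Algebra-NIT/Connect-4 | Answers/connect4.py | check_down_right
-- ===== SOURCE A (Python) =====
-- def check_down_right(i, j, board, count, icon):
--     try:
--         if board[i][j] == icon and count == 0:
--             return True
--         elif board[i][j] == icon:
--             return check_down_right(i+1, j+1, board, count-1, icon)
--         else:
--             return False
--     except:
--         return False
-- ===== SOURCE B (Python) =====
-- def check_down_right(i, j, board, count, icon):
--     k = 0
--     while True:
--         try:
--             cell = board[i + k][j + k]
--         except Exception:
--             return False
--         if cell != icon:
--             return False
--         if k == count:
--             return True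
--         k += 1
-- ===== Notes on version B (the rewrite author's own statement) =====
-- stated objective: simpler
-- what changed: Replaces the tail recursion that rebuilds all five arguments each call with an iterative walk driven by a single offset k, with one per-step try and flat early returns.
import Mathlib
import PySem

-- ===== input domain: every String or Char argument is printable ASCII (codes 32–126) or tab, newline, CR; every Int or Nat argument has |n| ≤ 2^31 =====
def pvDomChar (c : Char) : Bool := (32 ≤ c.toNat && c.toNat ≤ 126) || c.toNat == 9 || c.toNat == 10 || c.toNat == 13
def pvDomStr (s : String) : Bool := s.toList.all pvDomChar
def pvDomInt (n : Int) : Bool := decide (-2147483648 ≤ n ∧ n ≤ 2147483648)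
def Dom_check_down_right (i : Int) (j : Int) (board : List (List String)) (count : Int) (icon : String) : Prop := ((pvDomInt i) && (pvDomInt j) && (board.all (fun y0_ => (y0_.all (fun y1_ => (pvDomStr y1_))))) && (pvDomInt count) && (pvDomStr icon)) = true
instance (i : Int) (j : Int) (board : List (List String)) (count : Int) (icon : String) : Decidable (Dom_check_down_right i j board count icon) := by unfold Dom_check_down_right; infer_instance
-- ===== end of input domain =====

-- B replaces the tail recursion (which rebuilds all five arguments each call) by an
-- iterative walk driven by a single offset k, with one per-step bounds check and flat
-- early returns; objective: simpler.

-- termination helper for both ports (cited in their decreasing_by)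
theorem pvInRange_of_pyGet?_some {α : Type} (xs : List α) (i : Int) (x : α)
    (h : PySem.List.pyGet? xs i = some x) : PySem.Raise.InRange xs.length i := by
  by_contra hc
  simp [PySem.List.pyGet?, PySem.List.pyIdx?, PySem.Raise.InRange] at h hc
  split at h <;> split_ifs at h <;> simp_all <;> omega

-- ===== PORT A =====
-- A's recursion terminates because the row index strictly increases; the bare
-- 'except' of the Python is the 'none' arms (IndexError on board[i] / board[i][j]).
def check_down_right (i : Int) (j : Int) (board : List (List String)) (count : Int) (icon : String) : Bool :=
  match h : PySem.List.pyGet? board i with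
  | none => false
  | some row =>
    match PySem.List.pyGet? row j with
    | none => false
    | some cell =>
      if cell = icon ∧ count = 0 then true
      else if cell = icon then check_down_right (i+1) (j+1) board (count-1) icon
      else false
termination_by ((board.length : Int) - i).toNat
decreasing_by
  have hr := pvInRange_of_pyGet?_some board i row h
  simp [PySem.Raise.InRange] at hr
  omega

-- ===== PORT B =====
-- the 'while True' loop of Source B, state = the offset k; each iteration reads
-- board[i+k][j+k] inside its own try (the 'none' arms).
def cdr_walk (i : Int) (j : Int) (board : List (List String)) (icon : String) (count : Int) (k : Int) : Bool :=
  match h : PySem.List.pyGet? board (i + k) with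
  | none => false
  | some row =>
    match PySem.List.pyGet? row (j + k) with
    | none => false
    | some cell =>
      if cell ≠ icon then false
      else if k = count then true
      else cdr_walk i j board icon count (k+1)
termination_by ((board.length : Int) - (i + k)).toNat
decreasing_by
  have hr := pvInRange_of_pyGet?_some board (i + k) row h
  simp [PySem.Raise.InRange] at hr
  omega

def check_down_right_alt (i : Int) (j : Int) (board : List (List String)) (count : Int) (icon : String) : Bool :=
  cdr_walk i j board icon count 0

-- ===== PRECONDITION & SPEC =====
def Spec_check_down_right (i : Int) (j : Int) (board : List (List String)) (count : Int) (icon : String) (out : Bool) : Prop := out = check_down_right_alt i j board count icon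
instance (i : Int) (j : Int) (board : List (List String)) (count : Int) (icon : String) (out : Bool) : Decidable (Spec_check_down_right i j board count icon out) := by unfold Spec_check_down_right; infer_instance

-- ===== CLAIM (what is proved, stated in full; the proofs are below) =====
def Claim_equal_check_down_right : Prop := ∀ (i : Int) (j : Int) (board : List (List String)) (count : Int) (icon : String), Dom_check_down_right i j board count icon → Spec_check_down_right i j board count icon (check_down_right i j board count icon)

-- ===== LEMMAS AND PROOFS =====

-- ===== VERDICT (by name: the statement is the Claim_ definition above) =====
theorem cdr_walk_eq_rec (i : Int) (j : Int) (board : List (List String)) (icon : String) (count : Int) (k : Int) :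
    cdr_walk i j board icon count k = check_down_right (i+k) (j+k) board (count-k) icon := by
  induction k using cdr_walk.induct (i := i) (j := j) (board := board) (icon := icon) (count := count) with
  | case1 k h =>
      rw [cdr_walk, check_down_right]
      split <;> simp_all
  | case2 k row h h2 =>
      rw [cdr_walk, check_down_right]
      split <;> (try split) <;> simp_all
  | case3 k row h cell h2 hne =>
      rw [cdr_walk, check_down_right]
      split <;> (try split) <;> simp_all
  | case4 row cell hcell h h2 =>
      rw [cdr_walk, check_down_right]
      split <;> (try split) <;> simp_all
  | case5 k row h cell h2 hcell hk ih =>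
      have hck : count - k ≠ 0 := by omega
      have e1 : i + (k+1) = i + k + 1 := by ring
      have e2 : j + (k+1) = j + k + 1 := by ring
      have e3 : count - (k+1) = count - k - 1 := by ring
      rw [e1, e2, e3] at ih
      rw [cdr_walk, check_down_right]
      split <;> (try split) <;> simp_all

theorem check_down_right_spec : Claim_equal_check_down_right := by
  intro i j board count icon _
  unfold Spec_check_down_right check_down_right_alt
  have := cdr_walk_eq_rec i j board icon count 0
  simpa using this.symm
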